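-- pv_equiv track=rewrite | github.com/tyMadara/knExtr_Medical | dir_extract.py | nMerge2
-- ===== SOURCE A (Python) =====
-- def nMerge2(seg, label_list, dLabel = 'n'):
--     flag = 0
--     resList = []
--     for ele in seg:
--         if ele[1] not in label_list:
--             flag = 0
--             resList.append([ele[0],ele[1]])
--         elif ele[1] in label_list :
--             if flag == 0:
--                 flag = 1
--                 resList.append([ele[0],dLabel])
--             else:
--                 resList[-1][0] = resList[-1][0] + ele[0]
--     return resList
-- ===== SOURCE B (Python) =====
-- def nMerge2(seg, label_list, dLabel='n'):
--     labels = set(label_list)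
--     out = []
--     i = 0
--     n = len(seg)
--     while i < n:
--         first, lab = seg[i][0], seg[i][1]
--         i += 1
--         if lab in labels:
--             total = first
--             while i < n and seg[i][1] in labels:
--                 total = total + seg[i][0]
--                 i += 1
--             out.append([total, dLabel])
--         else:
--             out.append([first, lab])
--     return out
-- ===== Notes on version B (the rewrite author's own statement) =====
-- stated objective: alternative
-- what changed: Replaces A's flag state machine that appends a placeholder and then mutates resList[-1][0] with a run-at-a-time scan: membership is precomputed as a set, each labeled run is folded into its total by an inner loop before a single [total, dLabel] row is appended, and non-member rows are copied directly.
-- outside the precondition, e.g. on nMerge2([['a']], ['x'], 'n'): A raises IndexError, B raises IndexError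
import Mathlib
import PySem

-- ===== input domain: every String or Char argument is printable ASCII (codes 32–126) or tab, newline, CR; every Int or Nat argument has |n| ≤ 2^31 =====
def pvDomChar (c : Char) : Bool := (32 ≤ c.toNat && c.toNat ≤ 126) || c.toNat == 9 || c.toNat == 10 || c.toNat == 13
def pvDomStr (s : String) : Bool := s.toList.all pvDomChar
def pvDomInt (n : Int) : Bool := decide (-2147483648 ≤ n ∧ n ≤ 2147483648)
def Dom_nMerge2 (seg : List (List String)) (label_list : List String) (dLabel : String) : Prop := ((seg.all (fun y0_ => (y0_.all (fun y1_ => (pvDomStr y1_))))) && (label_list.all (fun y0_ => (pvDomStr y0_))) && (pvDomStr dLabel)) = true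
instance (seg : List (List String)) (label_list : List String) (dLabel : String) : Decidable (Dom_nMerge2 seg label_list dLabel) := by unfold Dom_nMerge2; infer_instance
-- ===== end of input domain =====

-- B replaces A's flag-plus-mutate-last-element loop by run-at-a-time consumption (an inner
-- loop folds each labeled run into one total before it is appended); objective: alternative.

-- ===== PORT A =====
-- resList[-1][0] = resList[-1][0] + ele[0]  (rewrite head of the last element)
def pvAddLast : List (List String) → String → List (List String)
  | [], _ => []
  | [l], v => [match l with | a :: tl => (a ++ v) :: tl | [] => []]
  | x :: y :: xs, v => x :: pvAddLast (y :: xs) v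

def nMerge2Loop (label_list : List String) (dLabel : String) (flag : Int)
    (resList : List (List String)) : List (List String) → List (List String)
  | [] => resList
  | ele :: rest =>
    let e0 := ele.getD 0 ""   -- ele[0]; Pre_ guarantees the index exists
    let e1 := ele.getD 1 ""   -- ele[1]
    if e1 ∉ label_list then
      nMerge2Loop label_list dLabel 0 (resList ++ [[e0, e1]]) rest
    else if e1 ∈ label_list then
      if flag = 0 then
        nMerge2Loop label_list dLabel 1 (resList ++ [[e0, dLabel]]) rest
      else
        nMerge2Loop label_list dLabel flag (pvAddLast resList e0) rest
    else
      nMerge2Loop label_list dLabel flag resList rest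

def nMerge2 (seg : List (List String)) (label_list : List String) (dLabel : String) : List (List String) :=
  nMerge2Loop label_list dLabel 0 [] seg

-- ===== PORT B =====
-- the inner while loop: fold one labeled run into `total`, return the unconsumed suffix
def pvConsumeRun (labels : PySem.Set String) (total : String) : List (List String) → String × List (List String)
  | [] => (total, [])
  | e :: rest =>
    if PySem.Set.contains labels (e.getD 1 "") then
      pvConsumeRun labels (total ++ e.getD 0 "") rest
    else (total, e :: rest)

theorem pvConsumeRun_len (labels : PySem.Set String) (total : String) (l : List (List String)) :
    (pvConsumeRun labels total l).2.length ≤ l.length := by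
  induction l generalizing total with
  | nil => simp [pvConsumeRun]
  | cons e rest ih =>
    simp only [pvConsumeRun]
    split
    · exact le_trans (ih _) (Nat.le_succ _)
    · simp

def pvAltLoop (labels : PySem.Set String) (dLabel : String) : List (List String) → List (List String)
  | [] => []
  | e :: rest =>
    if PySem.Set.contains labels (e.getD 1 "") then
      let p := pvConsumeRun labels (e.getD 0 "") rest
      [p.1, dLabel] :: pvAltLoop labels dLabel p.2
    else
      [e.getD 0 "", e.getD 1 ""] :: pvAltLoop labels dLabel rest
termination_by l => l.length
decreasing_by
  · exact Nat.lt_succ_of_le (pvConsumeRun_len _ _ _)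
  · simp

def nMerge2_alt (seg : List (List String)) (label_list : List String) (dLabel : String) : List (List String) :=
  pvAltLoop (PySem.Set.ofList label_list) dLabel seg

-- ===== PRECONDITION & SPEC =====
-- Pre_ excludes rows with fewer than two fields: there Python A (and B) raise IndexError on ele[1].
def Pre_nMerge2 (seg : List (List String)) (label_list : List String) (dLabel : String) : Prop :=
  ∀ e ∈ seg, 2 ≤ e.length
instance (seg : List (List String)) (label_list : List String) (dLabel : String) : Decidable (Pre_nMerge2 seg label_list dLabel) := by unfold Pre_nMerge2; infer_instance
def pvWitness_nMerge2 : List (List String) × List String × String :=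
  ([["a", "x"], ["b", "x"], ["c", "y"]], ["x"], "n")

def Spec_nMerge2 (seg : List (List String)) (label_list : List String) (dLabel : String) (out : List (List String)) : Prop := out = nMerge2_alt seg label_list dLabel
instance (seg : List (List String)) (label_list : List String) (dLabel : String) (out : List (List String)) : Decidable (Spec_nMerge2 seg label_list dLabel out) := by unfold Spec_nMerge2; infer_instance

-- ===== CLAIM (what is proved, stated in full; the proofs are below) =====
def Claim_equal_nMerge2 : Prop := ∀ (seg : List (List String)) (label_list : List String) (dLabel : String), Dom_nMerge2 seg label_list dLabel → Pre_nMerge2 seg label_list dLabel → Spec_nMerge2 seg label_list dLabel (nMerge2 seg label_list dLabel)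

-- ===== LEMMAS AND PROOFS =====
theorem pvAddLast_append (acc : List (List String)) (t d v : String) :
    pvAddLast (acc ++ [[t, d]]) v = acc ++ [[t ++ v, d]] := by
  induction acc with
  | nil => rfl
  | cons x xs ih =>
    cases xs with
    | nil => simp [pvAddLast]
    | cons y ys => simpa [pvAddLast] using ih

theorem pvContains_ofList (ll : List String) (x : String) :
    PySem.Set.contains (PySem.Set.ofList ll) x = true ↔ x ∈ ll := by
  rw [PySem.Set.contains_iff, PySem.Set.mem_ofList]

theorem pvMain (ll : List String) (d : String) (rest : List (List String)) :
    (∀ acc, nMerge2Loop ll d 0 acc rest = acc ++ pvAltLoop (PySem.Set.ofList ll) d rest) ∧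
    (∀ acc t, nMerge2Loop ll d 1 (acc ++ [[t, d]]) rest =
      acc ++ [(pvConsumeRun (PySem.Set.ofList ll) t rest).1, d] ::
        pvAltLoop (PySem.Set.ofList ll) d (pvConsumeRun (PySem.Set.ofList ll) t rest).2) := by
  induction rest with
  | nil => simp [nMerge2Loop, pvAltLoop, pvConsumeRun]
  | cons e rest ih =>
    obtain ⟨ih0, ih1⟩ := ih
    by_cases h : e.getD 1 "" ∈ ll
    · constructor
      · intro acc
        rw [nMerge2Loop]
        simp only [h, not_true_eq_false, if_false, if_true]
        rw [pvAltLoop]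
        rw [if_pos ((pvContains_ofList ll _).mpr h)]
        exact ih1 acc (e.getD 0 "")
      · intro acc t
        rw [nMerge2Loop]
        simp only [h, not_true_eq_false, if_false, if_true]
        rw [if_neg (by norm_num)]
        rw [pvAddLast_append]
        rw [show pvConsumeRun (PySem.Set.ofList ll) t (e :: rest) =
              pvConsumeRun (PySem.Set.ofList ll) (t ++ e.getD 0 "") rest from by
          rw [pvConsumeRun, if_pos ((pvContains_ofList ll _).mpr h)]]
        exact ih1 acc (t ++ e.getD 0 "")
    · have hc : ¬ PySem.Set.contains (PySem.Set.ofList ll) (e.getD 1 "") = true :=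
        fun hh => h ((pvContains_ofList ll _).mp hh)
      constructor
      · intro acc
        rw [nMerge2Loop]
        simp only [h, not_false_eq_true, if_true]
        rw [pvAltLoop, if_neg hc]
        rw [ih0 (acc ++ [[e.getD 0 "", e.getD 1 ""]])]
        simp
      · intro acc t
        rw [nMerge2Loop]
        simp only [h, not_false_eq_true, if_true]
        rw [show pvConsumeRun (PySem.Set.ofList ll) t (e :: rest) = (t, e :: rest) from by
          rw [pvConsumeRun, if_neg hc]]
        rw [ih0 ((acc ++ [[t, d]]) ++ [[e.getD 0 "", e.getD 1 ""]])]
        rw [pvAltLoop, if_neg hc]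
        simp

-- ===== VERDICT (by name: the statement is the Claim_ definition above) =====
theorem nMerge2_spec : Claim_equal_nMerge2 := by
  intro seg ll d _ _
  unfold Spec_nMerge2 nMerge2 nMerge2_alt
  simpa using (pvMain ll d seg).1 []
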